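-- pv_equiv track=rewrite | github.com/ntreyn/rl_algo | ttt_env.py | streak_contains
-- ===== SOURCE A (Python) =====
-- def streak_contains(streak, board_state):
--
--     sums = {}
--     sums['X'] = 0
--     sums['O'] = 0
--     sums[' '] = 0
--
--     for space in streak:
--         tile = board_state[space - 1]
--         if tile == 'X':
--             sums['X'] += 1
--         elif tile == 'O':
--             sums['O'] += 1
--         else:
--             sums[' '] += 1
--
--     return sums
-- ===== SOURCE B (Python) =====
-- def streak_contains(streak, board_state):
--     n = len(streak)
--     if n == 0:
--         return {'X': 0, 'O': 0, ' ': 0}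
--     if n == 1:
--         tile = board_state[streak[0] - 1]
--         return {'X': int(tile == 'X'),
--                 'O': int(tile == 'O'),
--                 ' ': int(tile != 'X' and tile != 'O')}
--     left = streak_contains(streak[:n // 2], board_state)
--     right = streak_contains(streak[n // 2:], board_state)
--     return {k: left[k] + right[k] for k in left}
-- ===== Notes on version B (the rewrite author's own statement) =====
-- stated objective: alternative
-- what changed: Replaces A's single-pass if/elif dict accumulation with a divide-and-conquer recursion: split the streak in half, count each half recursively (singleton leaves yield 0/1 indicator dicts) and merge the two dicts by key-wise addition.
import Mathlib
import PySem

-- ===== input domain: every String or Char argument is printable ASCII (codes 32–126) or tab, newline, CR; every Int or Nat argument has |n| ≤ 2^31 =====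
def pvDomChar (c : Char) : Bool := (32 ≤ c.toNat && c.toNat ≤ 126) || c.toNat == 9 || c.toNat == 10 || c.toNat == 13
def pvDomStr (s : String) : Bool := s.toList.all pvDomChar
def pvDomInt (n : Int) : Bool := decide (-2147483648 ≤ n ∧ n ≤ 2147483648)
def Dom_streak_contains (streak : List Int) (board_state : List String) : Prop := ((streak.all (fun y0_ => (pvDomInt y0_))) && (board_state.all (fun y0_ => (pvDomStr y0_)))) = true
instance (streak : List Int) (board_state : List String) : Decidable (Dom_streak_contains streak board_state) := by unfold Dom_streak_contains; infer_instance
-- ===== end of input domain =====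

-- B replaces A's single-pass if/elif dict accumulation with a divide-and-conquer
-- recursion (split in half, indicator dicts at singleton leaves, key-wise merge);
-- objective: alternative. Return value only.

-- ===== PORT A =====
-- loop body: board_state[space-1] via pyGetD (exact under Pre_, which requires the index in range)
def pvStepA (board_state : List String) (sums : PySem.Dict String Int) (space : Int) : PySem.Dict String Int :=
  let tile := PySem.List.pyGetD board_state (space - 1) ""
  if tile == "X" then sums.insert "X" (sums.getD "X" 0 + 1)
  else if tile == "O" then sums.insert "O" (sums.getD "O" 0 + 1)
  else sums.insert " " (sums.getD " " 0 + 1)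

def streak_contains (streak : List Int) (board_state : List String) : List (String × Int) :=
  let sums : PySem.Dict String Int := ((PySem.Dict.empty.insert "X" 0).insert "O" 0).insert " " 0
  (streak.foldl (pvStepA board_state) sums).items

-- ===== PORT B =====
-- {k: left[k] + right[k] for k in left}
def pvMergeB (l r : List (String × Int)) : List (String × Int) :=
  l.map (fun kv => (kv.1, kv.2 + PySem.Dict.getD (PySem.Dict.mk r) kv.1 0))

def streak_contains_alt (streak : List Int) (board_state : List String) : List (String × Int) :=
  if streak.length = 0 then [("X", 0), ("O", 0), (" ", 0)]
  else if streak.length = 1 then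
    let tile := PySem.List.pyGetD board_state (PySem.List.pyGetD streak 0 0 - 1) ""
    [("X", if tile == "X" then 1 else 0),
     ("O", if tile == "O" then 1 else 0),
     (" ", if !(tile == "X") && !(tile == "O") then 1 else 0)]
  else
    let left := streak_contains_alt (streak.take (streak.length / 2)) board_state
    let right := streak_contains_alt (streak.drop (streak.length / 2)) board_state
    pvMergeB left right
termination_by streak.length
decreasing_by
  · simp only [List.length_take]; omega
  · simp only [List.length_drop]; omega

-- ===== PRECONDITION & SPEC =====
-- excludes exactly the inputs where board_state[space-1] raises IndexError (in both A and B)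
def Pre_streak_contains (streak : List Int) (board_state : List String) : Prop :=
  ∀ s ∈ streak, PySem.Raise.InRange board_state.length (s - 1)
instance (streak : List Int) (board_state : List String) : Decidable (Pre_streak_contains streak board_state) := by unfold Pre_streak_contains; infer_instance
def pvWitness_streak_contains : List Int × List String := ([1, 2, 3], ["X", "O", " "])

def Spec_streak_contains (streak : List Int) (board_state : List String) (out : List (String × Int)) : Prop := out = streak_contains_alt streak board_state
instance (streak : List Int) (board_state : List String) (out : List (String × Int)) : Decidable (Spec_streak_contains streak board_state out) := by unfold Spec_streak_contains; infer_instance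

-- ===== CLAIM (what is proved, stated in full; the proofs are below) =====
def Claim_equal_streak_contains : Prop := ∀ (streak : List Int) (board_state : List String), Dom_streak_contains streak board_state → Pre_streak_contains streak board_state → Spec_streak_contains streak board_state (streak_contains streak board_state)

-- ===== LEMMAS AND PROOFS =====

-- the tiles along the streak
def pvTiles (board_state : List String) (streak : List Int) : List String :=
  streak.map (fun s => PySem.List.pyGetD board_state (s - 1) "")

-- A's loop over a dict that always has exactly the keys "X","O"," " keeps that
-- shape; the three slots accumulate the X-count, O-count and remainder-count.
lemma pvloopA (board_state : List String) (streak : List Int) :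
    ∀ (a b c : Int),
      (streak.foldl (pvStepA board_state) (PySem.Dict.mk [("X", a), ("O", b), (" ", c)])) =
        PySem.Dict.mk
          [("X", a + ((pvTiles board_state streak).count "X" : Int)),
           ("O", b + ((pvTiles board_state streak).count "O" : Int)),
           (" ", c + ((pvTiles board_state streak).countP
                 (fun t => !(t == "X") && !(t == "O")) : Int))] := by
  induction streak with
  | nil => intro a b c; simp [pvTiles]
  | cons s rest ih =>
    intro a b c
    simp only [List.foldl_cons, pvTiles, List.map_cons, pvStepA]
    by_cases hX : PySem.List.pyGetD board_state (s - 1) "" = "X"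
    · simp [hX, PySem.Dict.insert, PySem.Dict.getD, PySem.Dict.get?, pvTiles] at ih ⊢
      simp [ih]; ring
    · by_cases hO : PySem.List.pyGetD board_state (s - 1) "" = "O"
      · simp [hO, PySem.Dict.insert, PySem.Dict.getD, PySem.Dict.get?, pvTiles] at ih ⊢
        simp [ih]; ring
      · simp [hX, hO, PySem.Dict.insert, PySem.Dict.getD, PySem.Dict.get?, pvTiles] at ih ⊢
        simp [ih]; ring

-- B's divide-and-conquer always returns the three-key dict of the tile counts.
lemma pvAltEq (board_state : List String) (streak : List Int) :
    streak_contains_alt streak board_state =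
      [("X", ((pvTiles board_state streak).count "X" : Int)),
       ("O", ((pvTiles board_state streak).count "O" : Int)),
       (" ", ((pvTiles board_state streak).countP
             (fun t => !(t == "X") && !(t == "O")) : Int))] := by
  fun_induction streak_contains_alt streak board_state with
  | case1 st h0 =>
    have : st = [] := List.eq_nil_of_length_eq_zero h0
    simp [this, pvTiles]
  | case2 st h0 h1 tile =>
    obtain ⟨s, hs⟩ := List.length_eq_one_iff.mp h1
    subst hs
    have hg : tile = PySem.List.pyGetD board_state (s - 1) "" := rfl
    clear_value tile
    subst hg
    simp only [pvTiles, List.map_cons, List.map_nil, List.count_cons, List.count_nil,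
      List.countP_cons, List.countP_nil]
    by_cases hX : PySem.List.pyGetD board_state (s - 1) "" = "X"
    · simp [hX]
    · by_cases hO : PySem.List.pyGetD board_state (s - 1) "" = "O"
      · simp [hO]
      · simp [hX, hO]
  | case3 st h0 h1 left right ihl ihr =>
    have hl : left = _ := ihl
    have hr : right = _ := ihr
    clear_value left right
    subst hl; subst hr
    have hsplit : pvTiles board_state st =
        pvTiles board_state (st.take (st.length / 2)) ++
        pvTiles board_state (st.drop (st.length / 2)) := by
      simp [pvTiles]
    rw [hsplit]
    simp [pvMergeB, PySem.Dict.getD, PySem.Dict.get?, List.count_append, List.countP_append]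

-- ===== VERDICT (by name: the statement is the Claim_ definition above) =====
theorem streak_contains_spec : Claim_equal_streak_contains := by
  intro streak board_state _ _
  unfold Spec_streak_contains streak_contains
  have h0 : ((PySem.Dict.empty.insert "X" (0:Int)).insert "O" 0).insert " " 0 =
      PySem.Dict.mk [("X", 0), ("O", 0), (" ", 0)] := by decide
  simp only [h0, pvloopA, pvAltEq, zero_add]
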